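-- pv_equiv track=rewrite | github.com/mrhappynice/mhnos | demos/donut.py | precompute_rotations
-- ===== SOURCE A (Python) =====
-- def R(mul: int, shift: int, x: int, y: int):
--     _ = x
--     x -= (mul * y) >> shift
--     y += (mul * _) >> shift
--     _ = (3145728 - x * x - y * y) >> 11
--     x = (x * _) >> 10
--     y = (y * _) >> 10
--     return x, y
--
-- def precompute_rotations(count: int, mul: int, shift: int, c0: int, s0: int):
--     """Return lists of (c, s) for count steps, starting at (c0,s0), using R(mul,shift)."""
--     cs = [0] * count
--     ss = [0] * count
--     c, s = c0, s0
--     for k in range(count):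
--         cs[k] = c
--         ss[k] = s
--         c, s = R(mul, shift, c, s)
--     return cs, ss
-- ===== SOURCE B (Python) =====
-- def precompute_rotations(count: int, mul: int, shift: int, c0: int, s0: int):
--     """Return lists of (c, s) for count steps, starting at (c0,s0), using R(mul,shift).
--
--     Cycle-detecting rewrite: states are memoised in a dict; as soon as a state
--     repeats, the remaining output is produced by repeating the cycle's slice of
--     the already-built lists instead of re-running the map.
--     """
--     cs, ss = [], []
--     seen = {}
--     c, s = c0, s0
--     k = 0
--     while k < count:
--         j = seen.get((c, s))
--         if j is not None:
--             p = k - j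
--             rem = count - k
--             q, r = divmod(rem, p)
--             return (cs + cs[j:k] * q + cs[j:j + r],
--                     ss + ss[j:k] * q + ss[j:j + r])
--         seen[(c, s)] = k
--         cs.append(c)
--         ss.append(s)
--         t = c
--         c2 = c - ((mul * s) >> shift)
--         s2 = s + ((mul * t) >> shift)
--         f = (3145728 - c2 * c2 - s2 * s2) >> 11
--         c, s = (c2 * f) >> 10, (s2 * f) >> 10
--         k += 1
--     return cs, ss
-- ===== Notes on version B (the rewrite author's own statement) =====
-- stated objective: alternative
-- what changed: B replaces A's fixed count-step loop over two preallocated index-assigned arrays with a cycle-detecting loop: every state is memoised in a dict, and as soon as a state repeats the remaining output is produced by repeating the detected cycle's slice of the already-built lists (divmod + list repetition) instead of iterating the map further.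
import Mathlib
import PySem

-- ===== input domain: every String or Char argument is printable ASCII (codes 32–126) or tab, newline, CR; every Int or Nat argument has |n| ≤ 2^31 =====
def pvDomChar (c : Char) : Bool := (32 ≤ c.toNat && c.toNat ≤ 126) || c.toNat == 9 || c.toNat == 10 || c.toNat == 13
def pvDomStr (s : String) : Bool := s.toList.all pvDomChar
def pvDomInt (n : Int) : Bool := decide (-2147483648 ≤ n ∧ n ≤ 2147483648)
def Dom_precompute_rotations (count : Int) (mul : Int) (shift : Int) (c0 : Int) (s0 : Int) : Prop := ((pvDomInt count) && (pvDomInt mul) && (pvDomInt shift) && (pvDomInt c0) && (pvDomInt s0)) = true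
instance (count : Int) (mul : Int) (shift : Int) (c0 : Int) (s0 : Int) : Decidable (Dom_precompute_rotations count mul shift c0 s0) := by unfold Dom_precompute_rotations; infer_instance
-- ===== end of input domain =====

-- B replaces A's fixed loop over two preallocated index-assigned arrays with a cycle-detecting
-- loop: states are memoised in a dict and, once a state repeats, the remaining output is produced
-- by repeating the cycle's slice of the already-built lists (objective: alternative algorithm).

-- ===== PORT A =====
-- helper R of Source A; Python's '>> k' on ints is Lean's '>>> k' (arithmetic shift, floors on negatives)
def pvR (mul : Int) (shift : Int) (x : Int) (y : Int) : Int × Int :=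
  let u := x
  let x := x - ((mul * y) >>> shift.toNat)
  let y := y + ((mul * u) >>> shift.toNat)
  let u := (3145728 - x * x - y * y) >>> (11 : Nat)
  let x := (x * u) >>> (10 : Nat)
  let y := (y * u) >>> (10 : Nat)
  (x, y)

def precompute_rotations (count : Int) (mul : Int) (shift : Int) (c0 : Int) (s0 : Int) : List Int × List Int :=
  let cs : List Int := List.replicate count.toNat 0   -- [0] * count
  let ss : List Int := List.replicate count.toNat 0
  let st := (PySem.List.pyRange 0 count 1).foldl
    (fun (st : List Int × List Int × Int × Int) k =>
      let cs := st.1.set k.toNat st.2.2.1             -- cs[k] = c  (k is in range(count), so 0 ≤ k)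
      let ss := st.2.1.set k.toNat st.2.2.2           -- ss[k] = s
      let r := pvR mul shift st.2.2.1 st.2.2.2
      (cs, ss, r.1, r.2))
    (cs, ss, c0, s0)
  (st.1, st.2.1)

-- ===== PORT B =====
-- Source B's inlined step on a state pair (same arithmetic as R, written on the pair)
def pvStep (mul : Int) (shift : Int) (st : Int × Int) : Int × Int :=
  let t := st.1
  let c2 := st.1 - ((mul * st.2) >>> shift.toNat)
  let s2 := st.2 + ((mul * t) >>> shift.toNat)
  let f := (3145728 - c2 * c2 - s2 * s2) >>> (11 : Nat)
  ((c2 * f) >>> (10 : Nat), (s2 * f) >>> (10 : Nat))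

-- Source B's 'while k < count' loop; fuel = count - k (the loop leaves when k reaches count).
-- divmod(rem, p) is PySem.Int.floordiv / mod; 'cs[j:k] * q' is replicate q.toNat (Python's
-- list * n is empty for n ≤ 0) of the slice, flattened.
def pvBLoop (mul : Int) (shift : Int) (count : Int) :
    Nat → List Int → List Int → PySem.Dict (Int × Int) Int → Int → Int → Int → List Int × List Int
  | 0, cs, ss, _seen, _c, _s, _k => (cs, ss)
  | fuel + 1, cs, ss, seen, c, s, k =>
    match seen.get? (c, s) with
    | some j =>
      let p := k - j
      let rem := count - k
      let q := PySem.Int.floordiv rem p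
      let r := PySem.Int.mod rem p
      (cs ++ (List.replicate q.toNat (PySem.List.slice cs (some j) (some k))).flatten
          ++ PySem.List.slice cs (some j) (some (j + r)),
       ss ++ (List.replicate q.toNat (PySem.List.slice ss (some j) (some k))).flatten
          ++ PySem.List.slice ss (some j) (some (j + r)))
    | none =>
      let st := pvStep mul shift (c, s)
      pvBLoop mul shift count fuel (cs ++ [c]) (ss ++ [s]) (seen.insert (c, s) k) st.1 st.2 (k + 1)

def precompute_rotations_alt (count : Int) (mul : Int) (shift : Int) (c0 : Int) (s0 : Int) : List Int × List Int :=
  pvBLoop mul shift count count.toNat [] [] PySem.Dict.empty c0 s0 0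

-- ===== PRECONDITION & SPEC =====
-- Pre_ excludes exactly the inputs where Python A raises: a negative shift with count ≥ 1
-- makes '>> shift' raise ValueError inside R (B raises there too).
def Pre_precompute_rotations (count : Int) (mul : Int) (shift : Int) (c0 : Int) (s0 : Int) : Prop :=
  0 ≤ shift ∨ count ≤ 0
instance (count : Int) (mul : Int) (shift : Int) (c0 : Int) (s0 : Int) : Decidable (Pre_precompute_rotations count mul shift c0 s0) := by unfold Pre_precompute_rotations; infer_instance

def pvWitness_precompute_rotations : Int × Int × Int × Int × Int := (3, 5, 2, 1000, 0)

def Spec_precompute_rotations (count : Int) (mul : Int) (shift : Int) (c0 : Int) (s0 : Int) (out : List Int × List Int) : Prop := out = precompute_rotations_alt count mul shift c0 s0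
instance (count : Int) (mul : Int) (shift : Int) (c0 : Int) (s0 : Int) (out : List Int × List Int) : Decidable (Spec_precompute_rotations count mul shift c0 s0 out) := by unfold Spec_precompute_rotations; infer_instance

-- ===== CLAIM (what is proved, stated in full; the proofs are below) =====
def Claim_equal_precompute_rotations : Prop := ∀ (count : Int) (mul : Int) (shift : Int) (c0 : Int) (s0 : Int), Dom_precompute_rotations count mul shift c0 s0 → Pre_precompute_rotations count mul shift c0 s0 → Spec_precompute_rotations count mul shift c0 s0 (precompute_rotations count mul shift c0 s0)

-- ===== LEMMAS AND PROOFS =====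

-- the orbit of the step map: pvOrbit st n is the state after n steps
def pvOrbit (mul : Int) (shift : Int) (st : Int × Int) : Nat → Int × Int
  | 0 => st
  | n + 1 => pvOrbit mul shift (pvStep mul shift st) n

theorem pvOrbit_succ' (mul shift : Int) (st : Int × Int) (n : Nat) :
    pvOrbit mul shift st (n + 1) = pvStep mul shift (pvOrbit mul shift st n) := by
  induction n generalizing st with
  | zero => rfl
  | succ n ih => exact ih (pvStep mul shift st)

-- the list of the first n states (head recursion, matches A's write order)
def pvStates (mul : Int) (shift : Int) : Nat → Int → Int → List (Int × Int)
  | 0, _, _ => []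
  | n + 1, c, s => (c, s) :: pvStates mul shift n (pvStep mul shift (c, s)).1 (pvStep mul shift (c, s)).2

theorem pvStates_eq_map_orbit (mul shift : Int) (n : Nat) : ∀ c s : Int,
    pvStates mul shift n c s = (List.range n).map (pvOrbit mul shift (c, s)) := by
  induction n with
  | zero => intro c s; rfl
  | succ n ih =>
    intro c s
    rw [List.range_succ_eq_map, List.map_cons, List.map_map]
    show _ = pvOrbit mul shift (c, s) 0 :: _
    rw [pvStates]
    congr 1
    rw [ih]
    rfl

-- A-side loop invariant: folding A's body over indices [j, j+n) writes the n states into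
-- positions j..j+n-1 of the two arrays, whose prefixes of length j are untouched
theorem pvLoop (mul shift : Int) (n : Nat) : ∀ (j : Nat) (c s : Int) (cs ss : List Int),
    cs.length = j + n → ss.length = j + n →
    ∃ c' s',
      ((List.range' j n).map (Nat.cast : Nat → Int)).foldl
        (fun (st : List Int × List Int × Int × Int) k =>
          (st.1.set k.toNat st.2.2.1, st.2.1.set k.toNat st.2.2.2,
           (pvR mul shift st.2.2.1 st.2.2.2).1, (pvR mul shift st.2.2.1 st.2.2.2).2))
        (cs, ss, c, s)
      = (cs.take j ++ (pvStates mul shift n c s).map Prod.fst,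
         ss.take j ++ (pvStates mul shift n c s).map Prod.snd, c', s') := by
  induction n with
  | zero =>
    intro j c s cs ss hcs hss
    refine ⟨c, s, ?_⟩
    rw [List.take_of_length_le (by omega), List.take_of_length_le (by omega)]
    simp [pvStates]
  | succ n ih =>
    intro j c s cs ss hcs hss
    have hjcs : j < cs.length := by omega
    have hjss : j < ss.length := by omega
    rw [List.range'_succ, List.map_cons, List.foldl_cons]
    simp only [Int.toNat_natCast]
    obtain ⟨c', s', h⟩ := ih (j + 1) (pvR mul shift c s).1 (pvR mul shift c s).2
      (cs.set j c) (ss.set j s) (by simp; omega) (by simp; omega)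
    refine ⟨c', s', ?_⟩
    rw [h]
    have hset : ∀ (l : List Int) (a : Int), j < l.length →
        (l.set j a).take (j + 1) = l.take j ++ [a] := by
      intro l a hl
      rw [List.take_add_one, List.take_set_of_le le_rfl, List.getElem?_set_self hl]
      rfl
    rw [hset cs c hjcs, hset ss s hjss]
    have hstep : pvStates mul shift (n + 1) c s
        = (c, s) :: pvStates mul shift n (pvR mul shift c s).1 (pvR mul shift c s).2 := by
      simp [pvStates, pvR, pvStep]
    rw [hstep]
    simp

-- A's result is the unzip of the first count.toNat orbit states
theorem pvA_eq (count mul shift c0 s0 : Int) :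
    precompute_rotations count mul shift c0 s0
      = ((List.range count.toNat).map (fun t => (pvOrbit mul shift (c0, s0) t).1),
         (List.range count.toNat).map (fun t => (pvOrbit mul shift (c0, s0) t).2)) := by
  simp only [precompute_rotations]
  by_cases hc : count ≤ 0
  · simp [PySem.List.pyRange_one_eq_nil hc, Int.toNat_of_nonpos hc]
  · rw [PySem.List.pyRange_one, Int.sub_zero, List.range_eq_range']
    have hmap : List.map (fun k => (0 : Int) + ↑k) (List.range' 0 count.toNat)
        = (List.range' 0 count.toNat).map (Nat.cast : Nat → Int) := by simp
    rw [hmap]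
    obtain ⟨c', s', h⟩ := pvLoop mul shift count.toNat 0 c0 s0
      (List.replicate count.toNat 0) (List.replicate count.toNat 0) (by simp) (by simp)
    rw [h]
    simp [pvStates_eq_map_orbit, ← List.range_eq_range']

-- period p established at index i propagates forward along the orbit
theorem pvPeriodic (mul shift : Int) (st : Int × Int) (i p : Nat)
    (h : pvOrbit mul shift st (i + p) = pvOrbit mul shift st i) :
    ∀ t, pvOrbit mul shift st (i + p + t) = pvOrbit mul shift st (i + t) := by
  intro t
  induction t with
  | zero => exact h
  | succ t ih =>
    have e1 : i + p + (t + 1) = (i + p + t) + 1 := by omega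
    have e2 : i + (t + 1) = (i + t) + 1 := by omega
    rw [e1, e2, pvOrbit_succ', ih, ← pvOrbit_succ']

theorem pvPeriodic_mul (mul shift : Int) (st : Int × Int) (i p : Nat)
    (h : pvOrbit mul shift st (i + p) = pvOrbit mul shift st i) :
    ∀ q t, pvOrbit mul shift st (i + t + q * p) = pvOrbit mul shift st (i + t) := by
  intro q
  induction q with
  | zero => intro t; simp
  | succ q ih =>
    intro t
    have : i + t + (q + 1) * p = i + p + (t + q * p) := by ring
    rw [this, pvPeriodic mul shift st i p h (t + q * p), ← Nat.add_assoc, ih]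

theorem pvOrbit_mod (mul shift : Int) (st : Int × Int) (i p : Nat) (hp : 0 < p)
    (h : pvOrbit mul shift st (i + p) = pvOrbit mul shift st i) :
    ∀ t, pvOrbit mul shift st (i + p + t) = pvOrbit mul shift st (i + t % p) := by
  intro t
  have hdecomp : i + p + t = i + t % p + (t / p + 1) * p := by
    have := Nat.div_add_mod t p
    ring_nf
    omega
  rw [hdecomp, pvPeriodic_mul mul shift st i p h (t / p + 1) (t % p)]

-- unfolding a range map by blocks of p: range (q*p + r) through t % p
theorem pvRangeMod {α : Type} (g : Nat → α) (p : Nat) (hp : 0 < p) :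
    ∀ q r : Nat, (List.range (q * p + r)).map (fun t => g (t % p))
      = (List.replicate q ((List.range p).map g)).flatten
        ++ (List.range r).map (fun t => g (t % p)) := by
  intro q
  induction q with
  | zero => intro r; simp
  | succ q ih =>
    intro r
    have : (q + 1) * p + r = p + (q * p + r) := by ring
    rw [this, List.range_add, List.map_append, List.map_map, List.replicate_succ,
      List.flatten_cons, List.append_assoc]
    congr 1
    · exact List.map_congr_left (fun t ht => by
        have : t < p := List.mem_range.mp ht
        simp [Nat.mod_eq_of_lt this])
    · rw [← ih]
      exact List.map_congr_left (fun t _ => by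
        show g ((p + t) % p) = g (t % p)
        rw [Nat.add_comm, Nat.add_mod_right])

-- the cycle shortcut: repeating the cycle's slice of the prefix reproduces the tail of the orbit
theorem pvCycleOut (g : Nat → Int) (n jn pn : Nat) (hpn : 0 < pn) (hk : jn + pn ≤ n)
    (hper : ∀ t, g (jn + pn + t) = g (jn + t % pn)) :
    (List.range (jn + pn)).map g
      ++ (List.replicate ((n - (jn + pn)) / pn)
            ((((List.range (jn + pn)).map g).drop jn).take pn)).flatten
      ++ ((((List.range (jn + pn)).map g).drop jn).take ((n - (jn + pn)) % pn))
    = (List.range n).map g := by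
  have hdrop : ((List.range (jn + pn)).map g).drop jn = (List.range pn).map (fun t => g (jn + t)) := by
    rw [List.range_add, List.map_append, List.drop_left' (by simp), List.map_map]
    rfl
  have htake : ((List.range pn).map (fun t => g (jn + t))).take pn
      = (List.range pn).map (fun t => g (jn + t)) := List.take_of_length_le (by simp)
  have hmod : (n - (jn + pn)) % pn < pn := Nat.mod_lt _ hpn
  have htake2 : ((List.range pn).map (fun t => g (jn + t))).take ((n - (jn + pn)) % pn)
      = (List.range ((n - (jn + pn)) % pn)).map (fun t => g (jn + t)) := by
    rw [← List.map_take, List.take_range, Nat.min_eq_left (le_of_lt hmod)]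
  have hsplit : n = jn + pn + (n - (jn + pn)) := by omega
  have hrhs : (List.range n).map g
      = (List.range (jn + pn)).map g ++ (List.range (n - (jn + pn))).map (g ∘ ((jn + pn) + ·)) := by
    conv_lhs => rw [hsplit]
    rw [List.range_add, List.map_append, List.map_map]
  rw [hdrop, htake, htake2, hrhs, List.append_assoc]
  congr 1
  symm
  have hmap' : (List.range (n - (jn + pn))).map (g ∘ ((jn + pn) + ·))
      = (List.range (n - (jn + pn))).map (fun t => (fun u => g (jn + u)) (t % pn)) :=
    List.map_congr_left (fun t _ => hper t)
  rw [hmap']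
  have hqr : (n - (jn + pn)) / pn * pn + (n - (jn + pn)) % pn = n - (jn + pn) := by
    have := Nat.div_add_mod (n - (jn + pn)) pn
    rw [Nat.mul_comm] at this
    exact this
  conv_lhs => rw [← hqr]
  rw [pvRangeMod (fun u => g (jn + u)) pn hpn]
  congr 1
  exact List.map_congr_left (fun t ht => by
    have : t < pn := lt_trans (List.mem_range.mp ht) hmod
    simp [Nat.mod_eq_of_lt this])

-- B-side loop invariant
theorem pvBInv (mul shift count : Int) (c0 s0 : Int) :
    ∀ (fuel k : Nat) (seen : PySem.Dict (Int × Int) Int),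
      fuel = count.toNat - k → k ≤ count.toNat →
      (∀ key j, seen.get? key = some j →
        ∃ jn : Nat, j = (jn : Int) ∧ jn < k ∧ pvOrbit mul shift (c0, s0) jn = key) →
      pvBLoop mul shift count fuel
        ((List.range k).map (fun t => (pvOrbit mul shift (c0, s0) t).1))
        ((List.range k).map (fun t => (pvOrbit mul shift (c0, s0) t).2))
        seen (pvOrbit mul shift (c0, s0) k).1 (pvOrbit mul shift (c0, s0) k).2 (k : Int)
      = ((List.range count.toNat).map (fun t => (pvOrbit mul shift (c0, s0) t).1),
         (List.range count.toNat).map (fun t => (pvOrbit mul shift (c0, s0) t).2)) := by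
  intro fuel
  induction fuel with
  | zero =>
    intro k seen hfuel hk hseen
    have hkn : k = count.toNat := by omega
    subst hkn
    rfl
  | succ fuel ih =>
    intro k seen hfuel hk hseen
    have hkn : k < count.toNat := by omega
    simp only [pvBLoop]
    rcases hget : seen.get? ((pvOrbit mul shift (c0, s0) k).1, (pvOrbit mul shift (c0, s0) k).2)
      with _ | j
    · -- state not seen before: record it and continue
      dsimp only
      have hpair : ((pvOrbit mul shift (c0, s0) k).1, (pvOrbit mul shift (c0, s0) k).2)
          = pvOrbit mul shift (c0, s0) k := rfl
      have hstep : pvStep mul shift (pvOrbit mul shift (c0, s0) k)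
          = pvOrbit mul shift (c0, s0) (k + 1) := (pvOrbit_succ' mul shift _ k).symm
      have hcast : (k : Int) + 1 = ((k + 1 : Nat) : Int) := by push_cast; ring
      have hlist : ∀ g : Nat → Int, (List.range k).map g ++ [g k] = (List.range (k + 1)).map g := by
        intro g; rw [List.range_succ, List.map_append]; rfl
      rw [hpair, hstep, hcast, hlist (fun t => (pvOrbit mul shift (c0, s0) t).1),
        hlist (fun t => (pvOrbit mul shift (c0, s0) t).2)]
      apply ih (k + 1) _ (by omega) (by omega)
      intro key j hj
      rw [PySem.Dict.get?_insert] at hj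
      split at hj
      · rename_i hkey
        refine ⟨k, by simpa using hj.symm, by omega, ?_⟩
        rw [hkey]
      · obtain ⟨jn, hjn, hlt, ho⟩ := hseen _ _ hj
        exact ⟨jn, hjn, by omega, ho⟩
    · -- cycle found: emit the repeated slice
      dsimp only
      obtain ⟨jn, rfl, hjlt, horb⟩ := hseen _ _ hget
      have hper0 : pvOrbit mul shift (c0, s0) (jn + (k - jn)) = pvOrbit mul shift (c0, s0) jn := by
        rw [show jn + (k - jn) = k by omega, horb]
      have hpn : 0 < k - jn := by omega
      have hper : ∀ t, ∀ g : (Int × Int) → Int,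
          g (pvOrbit mul shift (c0, s0) (jn + (k - jn) + t))
            = g (pvOrbit mul shift (c0, s0) (jn + t % (k - jn))) := by
        intro t g
        rw [pvOrbit_mod mul shift (c0, s0) jn (k - jn) hpn hper0 t]
      -- arithmetic of the port's Int divmod and slices, in Nat form
      have hkeq : jn + (k - jn) = k := by omega
      have hpcast : (k : Int) - (jn : Int) = ((k - jn : Nat) : Int) := by omega
      have hrem : count - (k : Int) = ((count.toNat - k : Nat) : Int) := by omega
      rw [hpcast, hrem, PySem.Int.floordiv_natCast, PySem.Int.mod_natCast, Int.toNat_natCast]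
      have hjr : (jn : Int) + ((count.toNat - k) % (k - jn) : Nat)
          = ((jn + (count.toNat - k) % (k - jn) : Nat) : Int) := by push_cast; ring
      rw [hjr]
      rw [PySem.List.slice_natCast, PySem.List.slice_natCast, PySem.List.slice_natCast,
        PySem.List.slice_natCast]
      rw [show jn + (count.toNat - k) % (k - jn) - jn = (count.toNat - k) % (k - jn) by omega]
      refine Prod.ext ?_ ?_ <;> simp only
      · rw [← pvCycleOut (fun t => (pvOrbit mul shift (c0, s0) t).1) count.toNat jn (k - jn) hpn
          (by omega) (fun t => hper t Prod.fst)]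
        rw [hkeq]
      · rw [← pvCycleOut (fun t => (pvOrbit mul shift (c0, s0) t).2) count.toNat jn (k - jn) hpn
          (by omega) (fun t => hper t Prod.snd)]
        rw [hkeq]

-- ===== VERDICT (by name: the statement is the Claim_ definition above) =====
theorem precompute_rotations_spec : Claim_equal_precompute_rotations := by
  intro count mul shift c0 s0 _ _
  unfold Spec_precompute_rotations precompute_rotations_alt
  rw [pvA_eq]
  have h := pvBInv mul shift count c0 s0 count.toNat 0 PySem.Dict.empty (by omega) (by omega)
    (by intro key j h; rw [PySem.Dict.get?_empty] at h; exact absurd h (by simp))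
  simpa using h.symm
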